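-- pv_equiv track=rewrite | github.com/hanghang2333/disease_classify | src/util/data_filter.py | get_doctor_more
-- ===== SOURCE A (Python) =====
-- def get_doctor_more(datalines):
--     # 将接单树超过一次的医生的id放到set里返回
--     doc_doctor = {}
--     for i in datalines:
--         doc_doctor[i[0]] = i[4]
--     doctor_doc = {}  # {doctor-doclist}
--     for i in doc_doctor:
--         tmp = doctor_doc.get(doc_doctor[i], [])
--         if tmp == []:
--             doctor_doc[doc_doctor[i]] = [i]
--         else:
--             tmp.append(i)
--             doctor_doc[doc_doctor[i]] = tmp
--     # 将多余一个病单的医生的id存储到一个set里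
--     doctor = set()
--     for i in doctor_doc:
--         if (len(doctor_doc[i]) >= 2):
--             doctor.add(i)
--     return doctor
-- ===== SOURCE B (Python) =====
-- def get_doctor_more(datalines):
--     # Same first pass as A: map doc id -> doctor id, last write wins.
--     doc_doctor = {}
--     for i in datalines:
--         doc_doctor[i[0]] = i[4]
--     # Single worklist scan instead of A's doctor->doc-list inversion + length filter:
--     # pop each unique doc's doctor off the front; at a doctor's FIRST occurrence it
--     # has >= 2 docs exactly when it still occurs somewhere in the remaining worklist.
--     seen = set()
--     doctor = set()
--     remaining = list(doc_doctor.values())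
--     while remaining:
--         d = remaining.pop(0)
--         if d not in seen:
--             seen.add(d)
--             if d in remaining:
--                 doctor.add(d)
--     return doctor
-- ===== Notes on version B (the rewrite author's own statement) =====
-- stated objective: alternative
-- what changed: A inverts doc_doctor into a doctor->list-of-docs dict and filters by list length; B never builds that inversion: it runs a single destructive worklist scan over the unique docs' doctors, popping each element and, at a doctor's first occurrence, deciding membership in the remaining worklist (with a seen set to skip repeats).
import Mathlib
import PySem

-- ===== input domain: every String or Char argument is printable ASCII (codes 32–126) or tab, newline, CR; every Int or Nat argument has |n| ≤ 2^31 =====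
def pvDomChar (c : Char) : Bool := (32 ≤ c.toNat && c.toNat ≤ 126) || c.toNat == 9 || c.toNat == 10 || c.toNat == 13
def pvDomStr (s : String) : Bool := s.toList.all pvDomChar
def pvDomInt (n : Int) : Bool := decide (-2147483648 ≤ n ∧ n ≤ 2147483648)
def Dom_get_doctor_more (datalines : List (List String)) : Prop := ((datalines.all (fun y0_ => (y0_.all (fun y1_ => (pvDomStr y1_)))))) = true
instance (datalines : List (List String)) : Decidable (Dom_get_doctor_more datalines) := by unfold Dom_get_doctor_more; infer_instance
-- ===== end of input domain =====

-- B drops A's doctor->doc-list inversion and length filter; instead it consumes the unique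
-- docs' doctors as a worklist, popping each and testing membership in the remainder.

-- ===== PORT A =====
def get_doctor_more (datalines : List (List String)) : List String :=
  -- doc_doctor = {}; for i in datalines: doc_doctor[i[0]] = i[4]
  let doc_doctor : PySem.Dict String String :=
    datalines.foldl (fun d i =>
      d.insert (PySem.List.pyGetD i 0 "") (PySem.List.pyGetD i 4 "")) PySem.Dict.empty
  -- doctor_doc = {}; for i in doc_doctor: tmp = doctor_doc.get(doc_doctor[i], []); if tmp == []: … else: …
  let doctor_doc : PySem.Dict String (List String) :=
    doc_doctor.items.foldl (fun dd p =>
      let tmp := dd.getD p.2 []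
      if tmp == [] then dd.insert p.2 [p.1]
      else dd.insert p.2 (tmp ++ [p.1])) PySem.Dict.empty
  -- doctor = set(); for i in doctor_doc: if len(doctor_doc[i]) >= 2: doctor.add(i)
  doctor_doc.items.foldl (fun s p =>
    if p.2.length ≥ 2 then PySem.Set.add s p.1 else s) PySem.Set.empty

-- ===== PORT B =====
-- while remaining: d = remaining.pop(0); if d not in seen: seen.add(d); if d in remaining: doctor.add(d)
def pvLoopB : List String → List String → List String → List String
  | [], _, doctor => doctor
  | d :: remaining, seen, doctor =>
    if seen.contains d then pvLoopB remaining seen doctor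
    else pvLoopB remaining (PySem.Set.add seen d)
      (if remaining.contains d then PySem.Set.add doctor d else doctor)

def get_doctor_more_alt (datalines : List (List String)) : List String :=
  -- same first pass as A
  let doc_doctor : PySem.Dict String String :=
    datalines.foldl (fun d i =>
      d.insert (PySem.List.pyGetD i 0 "") (PySem.List.pyGetD i 4 "")) PySem.Dict.empty
  -- seen = set(); doctor = set(); remaining = list(doc_doctor.values()); while remaining: …
  pvLoopB doc_doctor.values PySem.Set.empty PySem.Set.empty

-- ===== PRECONDITION & SPEC =====
-- Pre_ excludes exactly the inputs on which the Python A raises IndexError: a row with fewer than 5 fields (i[0]/i[4]).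
def Pre_get_doctor_more (datalines : List (List String)) : Prop :=
  ∀ i ∈ datalines, 5 ≤ i.length
instance (datalines : List (List String)) : Decidable (Pre_get_doctor_more datalines) := by unfold Pre_get_doctor_more; infer_instance

def pvWitness_get_doctor_more : List (List String) :=
  [["d1", "a", "b", "c", "drX"], ["d2", "a", "b", "c", "drX"], ["d3", "a", "b", "c", "drY"]]

def Spec_get_doctor_more (datalines : List (List String)) (out : List String) : Prop := out = get_doctor_more_alt datalines
instance (datalines : List (List String)) (out : List String) : Decidable (Spec_get_doctor_more datalines out) := by unfold Spec_get_doctor_more; infer_instance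

-- ===== CLAIM (what is proved, stated in full; the proofs are below) =====
def Claim_equal_get_doctor_more : Prop := ∀ (datalines : List (List String)), Dom_get_doctor_more datalines → Pre_get_doctor_more datalines → Spec_get_doctor_more datalines (get_doctor_more datalines)

-- ===== LEMMAS AND PROOFS =====

-- A's second and third loops compute the set of values of D occurring at least twice,
-- added in first-occurrence order.
lemma groupA_eq (D : PySem.Dict String String) :
    ((D.items.foldl (fun dd p =>
        let tmp := dd.getD p.2 []
        if tmp == [] then dd.insert p.2 [p.1]
        else dd.insert p.2 (tmp ++ [p.1])) PySem.Dict.empty).items.foldl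
      (fun s p => if p.2.length ≥ 2 then PySem.Set.add s p.1 else s) PySem.Set.empty)
    = (PySem.Set.ofList D.values).foldl
        (fun s k => if 2 ≤ D.values.count k then PySem.Set.add s k else s) PySem.Set.empty := by
  have hstep : (fun (dd : PySem.Dict String (List String)) (p : String × String) =>
      let tmp := dd.getD p.2 []
      if tmp == [] then dd.insert p.2 [p.1] else dd.insert p.2 (tmp ++ [p.1]))
      = fun dd p => dd.modify p.2 [] (· ++ [p.1]) := by
    funext dd p
    simp only [PySem.Dict.modify]
    by_cases h : dd.getD p.2 [] = []
    · simp [h]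
    · simp [h]
  rw [hstep]
  set dd := D.items.foldl (fun dd p => dd.modify p.2 [] (· ++ [p.1])) PySem.Dict.empty with hdd
  have hkeys : dd.keys = PySem.Set.ofList D.values := by
    rw [hdd, PySem.Dict.keys_foldl_modify_key D.items (fun p => p.2) [] (fun _ p => (· ++ [p.1]))]
    rfl
  have hnd2 : dd.keys.Nodup := by
    rw [hkeys]; exact PySem.Set.nodup_ofList _
  have hget : ∀ c, dd.getD c [] = (D.items.filter (fun p => p.2 == c)).map (·.1) := by
    intro c
    have hm : dd = (D.items.map (fun p => (p.2, p.1))).foldl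
        (fun d q => d.modify q.1 [] (· ++ [q.2])) PySem.Dict.empty := by
      rw [hdd, List.foldl_map]
    rw [hm, PySem.Dict.getD_foldl_modify_append]
    simp [List.filter_map, List.map_map, Function.comp_def]
  have hlen : ∀ c, (dd.getD c []).length = D.values.count c := by
    intro c
    rw [hget, List.length_map]
    show _ = List.count c (D.items.map (·.2))
    rw [List.count, List.countP_map, List.countP_eq_length_filter]
    rfl
  rw [PySem.Dict.items_eq_map_keys dd hnd2 [], List.foldl_map]
  simp only [hlen, ge_iff_le]
  rw [hkeys]

-- A conditional add-loop is the fold of Set.add over the filtered list.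
lemma foldl_addif_eq_ofList_filter (vs : List String) (P : String → Prop) [DecidablePred P] :
    vs.foldl (fun s k => if P k then PySem.Set.add s k else s) PySem.Set.empty
    = PySem.Set.ofList (vs.filter (fun k => decide (P k))) := by
  rw [PySem.Set.ofList_eq_foldl, List.foldl_filter]
  simp

-- Set.discard commutes with List.filter.
lemma filter_discard (s : List String) (x : String) (p : String → Bool) :
    (PySem.Set.discard s x).filter p = PySem.Set.discard (s.filter p) x := by
  simp [PySem.Set.discard, List.filter_filter, Bool.and_comm]

-- set(filter(p, xs)) = filter(p, set(xs)) as ordered dedup lists.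
lemma ofList_filter (vs : List String) (p : String → Bool) :
    PySem.Set.ofList (vs.filter p) = (PySem.Set.ofList vs).filter p := by
  induction vs with
  | nil => rfl
  | cons x xs ih =>
    by_cases hp : p x
    · simp only [List.filter_cons, hp, if_pos, PySem.Set.ofList_cons, ih, filter_discard]
    · simp only [List.filter_cons, hp, Bool.false_eq_true, if_neg, PySem.Set.ofList_cons, ih,
        not_false_iff]
      rw [filter_discard]
      symm
      simp only [PySem.Set.discard]
      apply List.filter_eq_self.mpr
      intro a ha
      have hpa := List.of_mem_filter ha
      have : a ≠ x := by intro h; rw [h] at hpa; exact hp hpa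
      simp [this]

-- The add-loop over set(vs) equals the add-loop over vs (duplicates add nothing new).
lemma foldl_addif_ofList (vs : List String) (P : String → Prop) [DecidablePred P] :
    (PySem.Set.ofList vs).foldl (fun s k => if P k then PySem.Set.add s k else s) PySem.Set.empty
    = vs.foldl (fun s k => if P k then PySem.Set.add s k else s) PySem.Set.empty := by
  rw [foldl_addif_eq_ofList_filter, foldl_addif_eq_ofList_filter, ofList_filter,
    ofList_filter, PySem.Set.ofList_ofList]

-- B's worklist loop, with full list L = pre ++ rest, seen = set(pre), doctor = duplicated part of pre.
lemma loopB_inv (L : List String) :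
    ∀ (rest pre : List String), L = pre ++ rest →
    pvLoopB rest (PySem.Set.ofList pre)
        (PySem.Set.ofList (pre.filter (fun k => decide (2 ≤ L.count k))))
    = PySem.Set.ofList (L.filter (fun k => decide (2 ≤ L.count k))) := by
  intro rest
  induction rest with
  | nil => intro pre hL; simp [pvLoopB, hL]
  | cons d rest ih =>
    intro pre hL
    have hpre' : L = (pre ++ [d]) ++ rest := by simp [hL]
    have hcnt : L.count d = pre.count d + 1 + rest.count d := by
      simp [hL, List.count_append]; omega
    by_cases hd : d ∈ pre
    · have hcont : List.contains (PySem.Set.ofList pre) d = true := by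
        simp [PySem.Set.mem_ofList, hd]
      have hpd : decide (2 ≤ L.count d) = true := by
        have := List.one_le_count_iff.mpr hd
        simp; omega
      have hseen : PySem.Set.ofList (pre ++ [d]) = PySem.Set.ofList pre := by
        rw [PySem.Set.ofList_append_singleton,
          PySem.Set.add_of_mem ((PySem.Set.mem_ofList _ _).mpr hd)]
      have hdoc : PySem.Set.ofList ((pre ++ [d]).filter (fun k => decide (2 ≤ L.count k)))
          = PySem.Set.ofList (pre.filter (fun k => decide (2 ≤ L.count k))) := by
        rw [List.filter_append]
        simp only [List.filter_cons, hpd, if_true, List.filter_nil]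
        rw [PySem.Set.ofList_append_singleton, PySem.Set.add_of_mem]
        exact (PySem.Set.mem_ofList _ _).mpr (List.mem_filter.mpr ⟨hd, hpd⟩)
      rw [pvLoopB, hcont]
      simp only []
      rw [← hseen, ← hdoc]
      exact ih (pre ++ [d]) hpre'
    · have hcont : List.contains (PySem.Set.ofList pre) d = false := by
        simp [PySem.Set.mem_ofList, hd]
      have hseen : PySem.Set.add (PySem.Set.ofList pre) d = PySem.Set.ofList (pre ++ [d]) :=
        (PySem.Set.ofList_append_singleton pre d).symm
      have hcp : pre.count d = 0 := List.count_eq_zero.mpr hd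
      by_cases hr : d ∈ rest
      · have hpd : decide (2 ≤ L.count d) = true := by
          have := List.one_le_count_iff.mpr hr
          simp; omega
        have hrc : rest.contains d = true := by simp [hr]
        have hdoc : PySem.Set.add
              (PySem.Set.ofList (pre.filter (fun k => decide (2 ≤ L.count k)))) d
            = PySem.Set.ofList ((pre ++ [d]).filter (fun k => decide (2 ≤ L.count k))) := by
          rw [List.filter_append]
          simp only [List.filter_cons, hpd, if_true, List.filter_nil]
          rw [PySem.Set.ofList_append_singleton]
        rw [pvLoopB, hcont]
        simp only [Bool.false_eq_true, if_neg, not_false_iff, hrc, if_pos]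
        rw [hseen, hdoc]
        exact ih (pre ++ [d]) hpre'
      · have hpd : decide (2 ≤ L.count d) = false := by
          have := List.count_eq_zero.mpr hr
          simp; omega
        have hrc : rest.contains d = false := by simp [hr]
        have hdoc : (pre ++ [d]).filter (fun k => decide (2 ≤ L.count k))
            = pre.filter (fun k => decide (2 ≤ L.count k)) := by
          rw [List.filter_append]
          simp [hpd]
        rw [pvLoopB, hcont]
        simp only [Bool.false_eq_true, if_neg, not_false_iff, hrc]
        rw [hseen, ← hdoc]
        exact ih (pre ++ [d]) hpre'

theorem eq_all (datalines : List (List String)) :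
    get_doctor_more datalines = get_doctor_more_alt datalines := by
  unfold get_doctor_more get_doctor_more_alt
  set D := datalines.foldl (fun d i =>
      d.insert (PySem.List.pyGetD i 0 "") (PySem.List.pyGetD i 4 "")) PySem.Dict.empty with hD
  rw [groupA_eq, foldl_addif_ofList, foldl_addif_eq_ofList_filter]
  have h := loopB_inv D.values D.values [] (by simp)
  simpa using h.symm

-- ===== VERDICT (by name: the statement is the Claim_ definition above) =====
theorem get_doctor_more_spec : Claim_equal_get_doctor_more := by
  intro datalines _ _
  unfold Spec_get_doctor_more
  exact eq_all datalines
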